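-- pv_equiv track=rewrite | github.com/tamu-capstone-gardener/rails-react | app/assets/csv/auto_fill_plants.py | parse_gpt_output
-- ===== SOURCE A (Python) =====
-- def parse_gpt_output(output, incomplete_cols):
--     lines = output.strip().splitlines()
--     result = {}
--     for col in incomplete_cols:
--         for line in lines:
--             if line.lower().startswith(f"- {col.lower()}"):
--                 val = line.split(":", 1)[-1].strip()
--                 result[col] = val
--                 break
--     return result
-- ===== SOURCE B (Python) =====
-- def parse_gpt_output(output, incomplete_cols):
--     lines = output.strip().splitlines()
--     # One hash index per needed prefix length L: maps a lowered L-character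
--     # prefix to the extracted value of the FIRST line carrying that prefix,
--     # so looking a column up is a dict probe instead of a scan of the lines.
--     index = {}
--     for L in dict.fromkeys(len(col) + 2 for col in incomplete_cols):
--         table = {}
--         for line in lines:
--             key = line.lower()[:L]
--             if len(key) == L and key not in table:
--                 table[key] = line.split(":", 1)[-1].strip()
--         index[L] = table
--     result = {}
--     for col in incomplete_cols:
--         val = index[len(col) + 2].get("- " + col.lower())
--         if val is not None:
--             result[col] = val
--     return result
-- ===== Notes on version B (the rewrite author's own statement) =====
-- stated objective: faster
-- what changed: B builds, once per needed prefix length L, a hash table from each line's lowered L-character prefix to the first such line's extracted value, then answers every column by a single dict probe for '- '+col.lower(); A's per-column linear scan of the lines disappears.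
import Mathlib
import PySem

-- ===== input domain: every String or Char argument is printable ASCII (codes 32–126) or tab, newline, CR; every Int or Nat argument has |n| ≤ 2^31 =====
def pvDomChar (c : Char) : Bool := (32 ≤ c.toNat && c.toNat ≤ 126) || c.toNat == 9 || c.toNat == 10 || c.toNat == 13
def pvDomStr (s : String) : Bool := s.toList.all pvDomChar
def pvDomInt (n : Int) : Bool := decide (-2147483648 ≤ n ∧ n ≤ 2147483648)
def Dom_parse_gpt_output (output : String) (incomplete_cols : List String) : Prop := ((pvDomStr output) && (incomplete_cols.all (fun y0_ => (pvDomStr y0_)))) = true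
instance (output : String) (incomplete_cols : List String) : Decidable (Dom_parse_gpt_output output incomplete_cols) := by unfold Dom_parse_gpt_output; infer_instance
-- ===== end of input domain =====

-- B replaces A's per-column scan of the lines by hash indexes built once (one per needed
-- prefix length: lowered L-prefix of a line -> value of its first line), so each column is a
-- dict probe; same return value; a timing run measured B faster.

-- line.split(":", 1)[-1].strip()   (split with nonempty sep never returns none or []; getD unreachable)
def pvVal (line : String) : String :=
  PySem.Str.strip (((PySem.List.pyGet? ((PySem.Str.splitMax? line ":" 1).getD []) (-1))).getD "")

-- ===== PORT A =====
-- line.lower().startswith("- " + col.lower())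
def pvMatch (line col : String) : Bool :=
  PySem.Str.startswith (PySem.Str.lower line) ("- " ++ PySem.Str.lower col)

-- inner 'for line in lines: … break' loop of A
def pvA_scan (lines : List String) (col : String) (d : PySem.Dict String String) :
    PySem.Dict String String :=
  match lines with
  | [] => d
  | l :: ls => if pvMatch l col then d.insert col (pvVal l) else pvA_scan ls col d

def parse_gpt_output (output : String) (incomplete_cols : List String) : List (String × String) :=
  let lines := PySem.Str.splitlines (PySem.Str.strip output)
  (incomplete_cols.foldl (fun d col => pvA_scan lines col d) PySem.Dict.empty).items

-- ===== PORT B =====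
-- line.lower()[:L]
def pvKey (line : String) (L : Int) : String :=
  PySem.Str.slice (PySem.Str.lower line) none (some L)

-- inner 'for line in lines' loop of B: the per-length table
-- (lowered L-prefix of a line -> line.split(":",1)[-1].strip() of the FIRST such line)
def pvTabStep (L : Int) (t : PySem.Dict String String) (line : String) : PySem.Dict String String :=
  let key := pvKey line L
  if PySem.Str.len key = L ∧ t.contains key = false then t.insert key (pvVal line) else t

def pvTab (lines : List String) (L : Int) : PySem.Dict String String :=
  lines.foldl (pvTabStep L) PySem.Dict.empty

def parse_gpt_output_alt (output : String) (incomplete_cols : List String) : List (String × String) :=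
  let lines := PySem.Str.splitlines (PySem.Str.strip output)
  -- for L in dict.fromkeys(len(col) + 2 for col in incomplete_cols): index[L] = table
  let index : PySem.Dict Int (PySem.Dict String String) :=
    (PySem.List.dedup (incomplete_cols.map (fun col => PySem.Str.len col + 2))).foldl
      (fun ix L => ix.insert L (pvTab lines L)) PySem.Dict.empty
  (incomplete_cols.foldl (fun d col =>
      -- index[len(col)+2] never raises: the key was inserted from the same length expression;
      -- the getD default is unreachable
      match ((index.get? (PySem.Str.len col + 2)).getD PySem.Dict.empty).get?
              ("- " ++ PySem.Str.lower col) with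
      | some v => d.insert col v
      | none => d) PySem.Dict.empty).items

-- ===== PRECONDITION & SPEC =====
def Spec_parse_gpt_output (output : String) (incomplete_cols : List String) (out : List (String × String)) : Prop := out = parse_gpt_output_alt output incomplete_cols
instance (output : String) (incomplete_cols : List String) (out : List (String × String)) : Decidable (Spec_parse_gpt_output output incomplete_cols out) := by unfold Spec_parse_gpt_output; infer_instance

-- ===== CLAIM (what is proved, stated in full; the proofs are below) =====
def Claim_equal_parse_gpt_output : Prop := ∀ (output : String) (incomplete_cols : List String), Dom_parse_gpt_output output incomplete_cols → Spec_parse_gpt_output output incomplete_cols (parse_gpt_output output incomplete_cols)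

-- ===== LEMMAS AND PROOFS =====

-- the first matching line's value for a column: what A's inner loop computes
def pvFirst (lines : List String) (col : String) : Option String :=
  match lines with
  | [] => none
  | l :: ls => if pvMatch l col then some (pvVal l) else pvFirst ls col

theorem pvA_scan_eq (lines : List String) (col : String) (d : PySem.Dict String String) :
    pvA_scan lines col d =
      match pvFirst lines col with
      | some v => d.insert col v
      | none => d := by
  induction lines with
  | nil => rfl
  | cons l ls ih =>
      simp only [pvA_scan, pvFirst]
      by_cases h : pvMatch l col <;> simp [h, ih]

-- the first line whose lowered L-prefix is exactly p: what B's table stores at key p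
def pvFirstTab (lines : List String) (L : Int) (p : String) : Option String :=
  match lines with
  | [] => none
  | l :: ls =>
      if PySem.Str.len (pvKey l L) = L ∧ pvKey l L = p then some (pvVal l)
      else pvFirstTab ls L p

theorem pvTab_fold_get? (lines : List String) (L : Int) (p : String)
    (t : PySem.Dict String String) :
    (lines.foldl (pvTabStep L) t).get? p = (t.get? p).or (pvFirstTab lines L p) := by
  induction lines generalizing t with
  | nil => simp [pvFirstTab]
  | cons l ls ih =>
      rw [List.foldl_cons, ih]
      simp only [pvFirstTab, pvTabStep]
      by_cases hlen : PySem.Str.len (pvKey l L) = L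
      · by_cases hkey : pvKey l L = p
        · subst hkey
          rcases ht : t.get? (pvKey l L) with _ | v
          · have hcon : t.contains (pvKey l L) = false := by
              rw [PySem.Dict.contains_eq_isSome_get?, ht]; rfl
            rw [if_pos ⟨hlen, hcon⟩, if_pos ⟨hlen, rfl⟩,
              PySem.Dict.get?_insert_self]
            rfl
          · have hcon : t.contains (pvKey l L) = true := by
              rw [PySem.Dict.contains_eq_isSome_get?, ht]; rfl
            rw [if_neg (fun h => absurd (hcon.symm.trans h.2) (by decide)),
              if_pos ⟨hlen, rfl⟩, ht]
            rfl
        · have hno : ¬(PySem.Str.len (pvKey l L) = L ∧ pvKey l L = p) := fun h => hkey h.2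
          rw [if_neg hno]
          split
          · rw [PySem.Dict.get?_insert_of_ne t (pvVal l) (Ne.symm hkey)]
          · rfl
      · rw [if_neg (fun h => hlen h.1), if_neg (fun h => hlen h.1)]

theorem pvTab_get? (lines : List String) (L : Int) (p : String) :
    (pvTab lines L).get? p = pvFirstTab lines L p := by
  rw [pvTab, pvTab_fold_get?, PySem.Dict.get?_empty, Option.none_or]

-- B's index fold: a key not in the length list is untouched …
theorem pvIndex_get?_not_mem (lines : List String) (ks : List Int)
    (ix : PySem.Dict Int (PySem.Dict String String)) (k : Int) (h : k ∉ ks) :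
    (ks.foldl (fun ix L => ix.insert L (pvTab lines L)) ix).get? k = ix.get? k := by
  induction ks generalizing ix with
  | nil => rfl
  | cons a ks ih =>
      rw [List.foldl_cons, ih _ (fun hb => h (List.mem_cons_of_mem _ hb)),
        PySem.Dict.get?_insert_of_ne _ _ (fun hb => h (by rw [hb]; exact List.mem_cons_self))]

-- … and lookup of a key that does occur yields its table
theorem pvIndex_get? (lines : List String) (ks : List Int)
    (ix : PySem.Dict Int (PySem.Dict String String)) (k : Int) (h : k ∈ ks) :
    (ks.foldl (fun ix L => ix.insert L (pvTab lines L)) ix).get? k = some (pvTab lines k) := by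
  induction ks generalizing ix with
  | nil => cases h
  | cons a ks ih =>
      rw [List.foldl_cons]
      by_cases hk : k ∈ ks
      · exact ih _ hk
      · have ha : a = k := by
          rcases List.mem_cons.mp h with h' | h'
          · exact h'.symm
          · exact absurd h' hk
        subst ha
        rw [pvIndex_get?_not_mem _ _ _ _ hk, PySem.Dict.get?_insert_self]

theorem pv_lower_len (s : String) : (PySem.Str.lower s).toList.length = s.toList.length := by
  simp only [PySem.Str.toList_lower]
  unfold PySem.Chars.lower; simp

-- length of "- " ++ col.lower() is len(col) + 2
theorem pv_len_p (col : String) :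
    PySem.Str.len ("- " ++ PySem.Str.lower col) = PySem.Str.len col + 2 := by
  simp only [PySem.Str.len_eq, String.toList_append, List.length_append, pv_lower_len]
  push_cast; ring_nf
  simp [String.toList]

-- the prefix test and the L-slice-equality test agree (L = len("- " ++ col.lower()))
theorem pv_key_iff (line col : String) :
    (pvKey line (PySem.Str.len col + 2) = ("- " ++ PySem.Str.lower col)) ↔
      pvMatch line col = true := by
  set p := "- " ++ PySem.Str.lower col with hp
  have hLp : PySem.Str.len col + 2 = (p.toList.length : Int) := by
    have := pv_len_p col
    rw [← hp] at this
    simp only [PySem.Str.len_eq] at this ⊢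
    omega
  have hkey : (pvKey line (PySem.Str.len col + 2)).toList
      = (PySem.Str.lower line).toList.take p.toList.length := by
    rw [pvKey, hLp]
    have h0 : (0:Int) ≤ (p.toList.length : Int) := by positivity
    simp only [PySem.Str.toList_slice, PySem.Chars.slice_eq_listSlice,
      PySem.List.slice_to _ h0, Int.toNat_natCast]
  rw [pvMatch, ← hp, String.ext_iff, hkey]
  have hsw : PySem.Str.startswith (PySem.Str.lower line) p = true
      ↔ p.toList <+: (PySem.Str.lower line).toList := by
    rw [← PySem.Chars.startswith_iff]
    simp
  rw [hsw, List.prefix_iff_eq_take]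
  exact ⟨fun h => h.symm, fun h => h.symm⟩

-- the table's first match at key "- " ++ col.lower() is A's first match for col
theorem pvFirstTab_eq_pvFirst (lines : List String) (col : String) :
    pvFirstTab lines (PySem.Str.len col + 2) ("- " ++ PySem.Str.lower col)
      = pvFirst lines col := by
  induction lines with
  | nil => rfl
  | cons l ls ih =>
      simp only [pvFirstTab, pvFirst]
      by_cases hk : pvKey l (PySem.Str.len col + 2) = ("- " ++ PySem.Str.lower col)
      · have hm : pvMatch l col = true := (pv_key_iff l col).mp hk
        have hlen : PySem.Str.len (pvKey l (PySem.Str.len col + 2)) = PySem.Str.len col + 2 := by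
          rw [hk, pv_len_p]
        rw [if_pos ⟨hlen, hk⟩, if_pos hm]
      · have hm : pvMatch l col = false := by
          rcases hb : pvMatch l col with _ | _
          · rfl
          · exact absurd ((pv_key_iff l col).mpr hb) hk
        rw [if_neg (fun h => hk h.2), if_neg (by rw [hm]; decide), ih]

theorem pv_main (output : String) (incomplete_cols : List String) :
    parse_gpt_output output incomplete_cols = parse_gpt_output_alt output incomplete_cols := by
  show (incomplete_cols.foldl _ PySem.Dict.empty).items = (incomplete_cols.foldl _ PySem.Dict.empty).items
  apply congrArg PySem.Dict.items
  apply PySem.List.foldl_congr_mem'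
  intro col hc acc
  have hmem : PySem.Str.len col + 2
      ∈ PySem.List.dedup (incomplete_cols.map (fun c => PySem.Str.len c + 2)) := by
    rw [PySem.List.dedup_eq_ofList, PySem.Set.mem_ofList]
    exact List.mem_map.mpr ⟨col, hc, rfl⟩
  rw [pvA_scan_eq, pvIndex_get? _ _ _ _ hmem]
  simp only [Option.getD_some]
  rw [pvTab_get?, pvFirstTab_eq_pvFirst]

-- ===== VERDICT (by name: the statement is the Claim_ definition above) =====
theorem parse_gpt_output_spec : Claim_equal_parse_gpt_output := by
  intro output cols _
  exact pv_main output cols
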